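-- pv_equiv track=rewrite | github.com/CarmineN00/pnn-lip-based-biometric-verification | read_data.py | create_hashmap_from_ugly_labels_to_numbers
-- ===== SOURCE A (Python) =====
-- def create_hashmap_from_ugly_labels_to_numbers(list):
--     hashmap = {}
--     i = 0
--     for elem in list:
--         if hashmap.get(elem) is None:
--             hashmap[elem] = i
--             i = i+1
--     return hashmap
-- ===== SOURCE B (Python) =====
-- def create_hashmap_from_ugly_labels_to_numbers(list):
--     # reverse overwrite scan: last write wins, so each label keeps its
--     # first-occurrence index; then labels are ranked by sorting those indices
--     n = len(list)
--     first = {e: n - 1 - i for i, e in enumerate(reversed(list))}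
--     by_first = sorted(first.items(), key=lambda item: item[1])
--     return {e: r for r, (e, i) in enumerate(by_first)}
-- ===== Notes on version B (the rewrite author's own statement) =====
-- stated objective: alternative
-- what changed: Replaces A's fused seen-dict-plus-counter loop by a three-phase algorithm with no membership test and no counter: a reverse overwrite scan (last write wins) records each label's first-occurrence index, those (label, index) items are sorted by index, and the sorted position becomes the label's number.
import Mathlib
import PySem

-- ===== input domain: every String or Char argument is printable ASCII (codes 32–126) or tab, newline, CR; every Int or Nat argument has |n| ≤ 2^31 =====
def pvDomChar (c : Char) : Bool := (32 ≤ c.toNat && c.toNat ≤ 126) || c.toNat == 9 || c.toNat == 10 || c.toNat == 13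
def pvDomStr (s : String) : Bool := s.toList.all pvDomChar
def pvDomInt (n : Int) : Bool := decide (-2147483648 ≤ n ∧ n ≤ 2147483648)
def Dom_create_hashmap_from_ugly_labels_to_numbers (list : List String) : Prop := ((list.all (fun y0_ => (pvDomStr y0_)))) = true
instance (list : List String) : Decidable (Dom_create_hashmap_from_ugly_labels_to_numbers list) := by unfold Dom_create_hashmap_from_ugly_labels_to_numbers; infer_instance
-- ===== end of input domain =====

-- B replaces A's fused seen-dict-plus-counter loop by a different algorithm: a reverse
-- overwrite scan records each label's first-occurrence index, then labels are ranked by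
-- sorting those indices; objective: alternative (same task, genuinely different strategy).

-- ===== PORT A =====
def create_hashmap_from_ugly_labels_to_numbers (list : List String) : List (String × Int) :=
  let st := list.foldl
    (fun (st : PySem.Dict String Int × Int) elem =>
      if (st.1.get? elem) = none then (st.1.insert elem st.2, st.2 + 1) else st)
    (PySem.Dict.empty, 0)
  st.1.items

-- ===== PORT B =====
def create_hashmap_from_ugly_labels_to_numbers_alt (list : List String) : List (String × Int) :=
  let n : Int := (list.length : Int)
  -- first = {e: n - 1 - i for i, e in enumerate(reversed(list))}
  let first := (PySem.List.enumerate list.reverse).foldl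
      (fun (d : PySem.Dict String Int) p => d.insert p.2 (n - 1 - p.1)) PySem.Dict.empty
  -- by_first = sorted(first.items(), key=lambda item: item[1])
  let byFirst := PySem.List.sorted first.items (fun item => item.2)
  -- {e: r for r, (e, i) in enumerate(by_first)}
  ((PySem.List.enumerate byFirst).foldl
      (fun (d : PySem.Dict String Int) rp => d.insert rp.2.1 rp.1) PySem.Dict.empty).items

-- ===== PRECONDITION & SPEC =====
def Spec_create_hashmap_from_ugly_labels_to_numbers (list : List String) (out : List (String × Int)) : Prop := out = create_hashmap_from_ugly_labels_to_numbers_alt list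
instance (list : List String) (out : List (String × Int)) : Decidable (Spec_create_hashmap_from_ugly_labels_to_numbers list out) := by unfold Spec_create_hashmap_from_ugly_labels_to_numbers; infer_instance

-- ===== CLAIM (what is proved, stated in full; the proofs are below) =====
def Claim_equal_create_hashmap_from_ugly_labels_to_numbers : Prop := ∀ (list : List String), Dom_create_hashmap_from_ugly_labels_to_numbers list → Spec_create_hashmap_from_ugly_labels_to_numbers list (create_hashmap_from_ugly_labels_to_numbers list)

-- ===== LEMMAS AND PROOFS =====

-- A's loop state after having seen the distinct labels s (in order)
def pvEncode (s : List String) : PySem.Dict String Int × Int :=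
  (PySem.Dict.mk ((PySem.List.enumerate s).map (fun p => (p.2, p.1))), (s.length : Int))

lemma pvEncode_keys (s : List String) : (pvEncode s).1.keys = s := by
  simp [pvEncode, PySem.Dict.keys, List.map_map, Function.comp_def]

lemma pvEncode_step (s : List String) (x : String) :
    (if ((pvEncode s).1.get? x) = none then
       ((pvEncode s).1.insert x (pvEncode s).2, (pvEncode s).2 + 1)
     else pvEncode s) = pvEncode (PySem.Set.add s x) := by
  by_cases hx : x ∈ s
  · have hg : (pvEncode s).1.get? x ≠ none := by
      rw [Ne, PySem.Dict.get?_eq_none_iff_not_mem_keys, pvEncode_keys]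
      simp [hx]
    simp [hg, PySem.Set.add, PySem.Set.contains, hx]
  · have hg : (pvEncode s).1.get? x = none := by
      rw [PySem.Dict.get?_eq_none_iff_not_mem_keys, pvEncode_keys]; exact hx
    have hc : (pvEncode s).1.contains x = false := by
      rw [PySem.Dict.contains_eq_decide_mem_keys, pvEncode_keys]; simp [hx]
    simp only [hg, if_pos]
    have hadd : PySem.Set.add s x = s ++ [x] := by
      simp [PySem.Set.add, PySem.Set.contains, hx]
    rw [hadd]
    apply Prod.ext
    · apply PySem.Dict.ext
      rw [PySem.Dict.items_insert_of_not_contains (h := hc)]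
      simp [pvEncode, PySem.List.enumerate_append, PySem.List.enumerate_cons,
        PySem.List.enumerate_nil]
    · simp [pvEncode]

lemma pvLoopA (l : List String) (s : List String) :
    l.foldl
      (fun (st : PySem.Dict String Int × Int) elem =>
        if (st.1.get? elem) = none then (st.1.insert elem st.2, st.2 + 1) else st)
      (pvEncode s)
    = pvEncode (l.foldl PySem.Set.add s) := by
  induction l generalizing s with
  | nil => rfl
  | cons x xs ih =>
    simp only [List.foldl_cons]
    rw [pvEncode_step, ih]

-- B's reverse scan, generalised with an offset c (c = 0 is the scan B performs)
def pvScan (c : Int) (l : List String) : PySem.Dict String Int :=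
  (PySem.List.enumerate l.reverse).foldl
    (fun (d : PySem.Dict String Int) p => d.insert p.2 (c + ((l.length : Int) - 1 - p.1)))
    PySem.Dict.empty

lemma pvScan_cons (c : Int) (x : String) (t : List String) :
    pvScan c (x :: t) = (pvScan (c + 1) t).insert x c := by
  unfold pvScan
  rw [show (x :: t).reverse = t.reverse ++ [x] by simp, PySem.List.enumerate_append,
    List.foldl_append]
  have hfun : (fun (d : PySem.Dict String Int) (p : Int × String) =>
        d.insert p.2 (c + (((x :: t).length : Int) - 1 - p.1)))
      = (fun (d : PySem.Dict String Int) (p : Int × String) =>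
        d.insert p.2 ((c + 1) + ((t.length : Int) - 1 - p.1))) := by
    funext d p; congr 1; simp only [List.length_cons]; push_cast; ring
  rw [hfun]
  simp only [PySem.List.enumerate_cons, PySem.List.enumerate_nil, List.foldl_cons,
    List.foldl_nil, List.length_reverse]
  congr 1
  ring

lemma pvScan_get? (c : Int) (l : List String) (e : String) :
    (pvScan c l).get? e = if e ∈ l then some (c + (l.idxOf e : Int)) else none := by
  induction l generalizing c with
  | nil => simp [pvScan, PySem.List.enumerate_nil, PySem.Dict.get?_empty]
  | cons x t ih =>
    rw [pvScan_cons]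
    by_cases hex : e = x
    · subst hex
      rw [PySem.Dict.get?_insert_self]
      simp [List.idxOf_cons_self]
    · rw [PySem.Dict.get?_insert_of_ne _ _ hex, ih]
      by_cases het : e ∈ t
      · rw [if_pos het, if_pos (by simp [hex, het])]
        rw [List.idxOf_cons_ne _ (by simpa using Ne.symm hex)]
        push_cast; ring_nf
      · rw [if_neg het, if_neg (by simp [hex, het])]

lemma pvScan_keys (c : Int) (l : List String) :
    (pvScan c l).keys = PySem.List.dedup l.reverse := by
  unfold pvScan
  rw [PySem.Dict.keys_foldl_insert_key (key := fun p : Int × String => p.2)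
    (f := fun _ p => c + ((l.length : Int) - 1 - p.1))]
  simp [PySem.List.map_snd_enumerate, PySem.List.dedup_eq_ofList,
    PySem.Set.ofList_eq_foldl, PySem.Set.update, PySem.Dict.keys_empty]

lemma pvScan_items (l : List String) :
    (pvScan 0 l).items
      = (PySem.List.dedup l.reverse).map (fun e => (e, (l.idxOf e : Int))) := by
  rw [PySem.Dict.items_eq_map_keys _ (by rw [pvScan_keys]; exact PySem.List.nodup_dedup _) 0,
    pvScan_keys]
  apply List.map_congr_left
  intro e he
  have hel : e ∈ l := by simpa using (PySem.List.mem_dedup _ _).1 he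
  have hg := pvScan_get? 0 l e
  rw [if_pos hel] at hg
  simp [PySem.Dict.getD_eq_get?_getD, hg]

-- the ordered distinct labels have strictly increasing first-occurrence indices
lemma pvPairwiseIdx (l : List String) :
    (PySem.List.dedup l).Pairwise (fun a b => l.idxOf a < l.idxOf b) := by
  induction l using List.reverseRecOn with
  | nil => simp [PySem.List.dedup_eq_ofList, PySem.Set.ofList_eq_foldl]
  | append_singleton l x ih =>
    have hofl : PySem.List.dedup (l ++ [x]) = PySem.Set.add (PySem.List.dedup l) x := by
      simp only [PySem.List.dedup_eq_ofList, PySem.Set.ofList_eq_foldl, List.foldl_append]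
      rfl
    rw [hofl]
    by_cases hx : x ∈ l
    · have hadd : PySem.Set.add (PySem.List.dedup l) x = PySem.List.dedup l := by
        simp [PySem.Set.add, PySem.Set.contains, PySem.List.dedup_eq_ofList,
          PySem.Set.mem_ofList, hx]
      rw [hadd]
      refine ih.imp_of_mem ?_
      intro a b ha hb hab
      rwa [List.idxOf_append_of_mem ((PySem.List.mem_dedup _ _).1 ha),
        List.idxOf_append_of_mem ((PySem.List.mem_dedup _ _).1 hb)]
    · have hadd : PySem.Set.add (PySem.List.dedup l) x = PySem.List.dedup l ++ [x] := by
        simp [PySem.Set.add, PySem.Set.contains, PySem.List.dedup_eq_ofList,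
          PySem.Set.mem_ofList, hx]
      rw [hadd, List.pairwise_append]
      refine ⟨ih.imp_of_mem ?_, by simp, ?_⟩
      · intro a b ha hb hab
        rwa [List.idxOf_append_of_mem ((PySem.List.mem_dedup _ _).1 ha),
          List.idxOf_append_of_mem ((PySem.List.mem_dedup _ _).1 hb)]
      · intro a ha y hy
        simp only [List.mem_singleton] at hy
        subst hy
        have ha' : a ∈ l := (PySem.List.mem_dedup _ _).1 ha
        rw [List.idxOf_append_of_mem ha', List.idxOf_append_of_notMem hx]
        have := List.idxOf_lt_length_of_mem ha'
        simp only [List.idxOf_cons_self]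
        omega

lemma pvSorted (l : List String) :
    PySem.List.sorted (pvScan 0 l).items (fun item => item.2)
      = (PySem.List.dedup l).map (fun e => (e, (l.idxOf e : Int))) := by
  apply PySem.List.sorted_eq_of_perm_of_pairwise_lt
  · rw [pvScan_items]
    apply List.Perm.map
    apply (List.perm_ext_iff_of_nodup (PySem.List.nodup_dedup _) (PySem.List.nodup_dedup _)).mpr
    intro a
    simp
  · rw [List.pairwise_map]
    refine (pvPairwiseIdx l).imp ?_
    intro a b h
    simp only
    exact_mod_cast h

lemma pvEnumerateMap {α β : Type} (f : α → β) (xs : List α) (s : Int) :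
    PySem.List.enumerate (xs.map f) s = (PySem.List.enumerate xs s).map (fun p => (p.1, f p.2)) := by
  induction xs generalizing s with
  | nil => simp [PySem.List.enumerate_nil]
  | cons x t ih => simp [PySem.List.enumerate_cons, ih]

-- ===== VERDICT (by name: the statement is the Claim_ definition above) =====
theorem create_hashmap_from_ugly_labels_to_numbers_spec : Claim_equal_create_hashmap_from_ugly_labels_to_numbers := by
  intro list _
  unfold Spec_create_hashmap_from_ugly_labels_to_numbers
  unfold create_hashmap_from_ugly_labels_to_numbers create_hashmap_from_ugly_labels_to_numbers_alt
  -- A side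
  have h0 : (PySem.Dict.empty, (0 : Int)) = pvEncode [] := rfl
  rw [h0, pvLoopA, ← PySem.Set.ofList_eq_foldl]
  -- B side: the scan is pvScan 0 list
  have hfirst :
      (PySem.List.enumerate list.reverse).foldl
        (fun (d : PySem.Dict String Int) p => d.insert p.2 ((list.length : Int) - 1 - p.1))
        PySem.Dict.empty = pvScan 0 list := by
    unfold pvScan
    apply PySem.List.foldl_congr_mem
    intro d p _
    congr 1
    ring
  simp only [hfirst, pvSorted, pvEnumerateMap, List.foldl_map]
  have hfresh :
      (List.foldl (fun (x : PySem.Dict String Int) (y : Int × String) => x.insert y.2 y.1)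
          PySem.Dict.empty (PySem.List.enumerate (PySem.List.dedup list))).items
        = PySem.Dict.empty.items
          ++ (PySem.List.enumerate (PySem.List.dedup list)).map (fun y => (y.2, y.1)) := by
    exact PySem.Dict.items_foldl_insert_fresh
      (PySem.List.enumerate (PySem.List.dedup list))
      (fun p : Int × String => p.2) (fun p : Int × String => p.1) PySem.Dict.empty
      (by intro a _; exact PySem.Dict.contains_empty _)
      (by rw [PySem.List.map_snd_enumerate]; exact PySem.List.nodup_dedup _)
  rw [hfresh]
  simp [pvEncode, PySem.List.dedup_eq_ofList, PySem.Dict.empty]
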